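-- pv_equiv track=rewrite | github.com/dillontadeo/ai-content-pipeline | src/crm_integration.py | segment_contacts_by_persona
-- ===== SOURCE A (Python) =====
-- from typing import Dict, List, Optional
--
-- def segment_contacts_by_persona(contacts: List[Dict]) -> Dict[str, List[Dict]]:
--     """
--     Segment contacts by persona type.
--
--     Args:
--         contacts: List of all contacts
--
--     Returns:
--         Dictionary with persona keys and contact lists
--     """
--     segmented = {
--         'founders': [],
--         'creatives': [],
--         'operations': []
--     }
--
--     for contact in contacts:
--         persona = contact.get('persona', '').lower()
--         if persona in segmented:
--             segmented[persona].append(contact)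
--
--     return segmented
-- ===== SOURCE B (Python) =====
-- from typing import Dict, List, Optional
--
-- def segment_contacts_by_persona(contacts: List[Dict]) -> Dict[str, List[Dict]]:
--     """Segment contacts by persona type (three independent filter passes)."""
--     return {
--         persona: [c for c in contacts if c.get('persona', '').lower() == persona]
--         for persona in ('founders', 'creatives', 'operations')
--     }
-- ===== Notes on version B (the rewrite author's own statement) =====
-- stated objective: idiomatic
-- what changed: Replaces the single accumulating pass that mutates a pre-built bucket dict with a dict comprehension over the three fixed personas, each bucket produced by its own independent filter over the contacts (no mutable state, no membership test).
import Mathlib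
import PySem

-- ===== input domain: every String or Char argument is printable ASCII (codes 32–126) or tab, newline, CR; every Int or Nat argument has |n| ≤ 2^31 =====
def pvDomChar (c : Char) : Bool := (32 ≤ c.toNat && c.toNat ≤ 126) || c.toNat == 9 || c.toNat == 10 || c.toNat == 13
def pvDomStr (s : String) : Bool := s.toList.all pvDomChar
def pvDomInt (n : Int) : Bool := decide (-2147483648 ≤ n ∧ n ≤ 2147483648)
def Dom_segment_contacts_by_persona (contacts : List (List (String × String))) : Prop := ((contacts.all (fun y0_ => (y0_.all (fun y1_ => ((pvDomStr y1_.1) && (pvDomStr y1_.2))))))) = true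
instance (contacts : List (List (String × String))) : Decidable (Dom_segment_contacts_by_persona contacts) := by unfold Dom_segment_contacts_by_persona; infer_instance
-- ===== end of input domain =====

-- B replaces A's single mutating-bucket pass with three independent filter passes, one per fixed persona (idiomatic).


-- ===== PORT A =====
-- contact.get('persona','').lower()
def pvPersonaOf (c : List (String × String)) : String :=
  PySem.Str.lower ((PySem.Dict.mk c).getD "persona" "")

-- loop body of A: persona = contact.get('persona','').lower(); if persona in segmented: segmented[persona].append(contact)
def pvStepA (segmented : PySem.Dict String (List (List (String × String)))) (contact : List (String × String)) : PySem.Dict String (List (List (String × String))) :=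
  let persona := pvPersonaOf contact
  if segmented.contains persona then
    segmented.modify persona [] (fun l => l ++ [contact])
  else segmented

def segment_contacts_by_persona (contacts : List (List (String × String))) : List (String × List (List (String × String))) :=
  let init : PySem.Dict String (List (List (String × String))) :=
    PySem.Dict.mk [("founders", []), ("creatives", []), ("operations", [])]
  (contacts.foldl pvStepA init).items

-- ===== PORT B =====
def segment_contacts_by_persona_alt (contacts : List (List (String × String))) : List (String × List (List (String × String))) :=
  ["founders", "creatives", "operations"].map (fun persona =>
    (persona, contacts.filter (fun c => pvPersonaOf c == persona)))

-- ===== PRECONDITION & SPEC =====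
def Spec_segment_contacts_by_persona (contacts : List (List (String × String))) (out : List (String × List (List (String × String)))) : Prop := out = segment_contacts_by_persona_alt contacts
instance (contacts : List (List (String × String))) (out : List (String × List (List (String × String)))) : Decidable (Spec_segment_contacts_by_persona contacts out) := by unfold Spec_segment_contacts_by_persona; infer_instance

-- ===== CLAIM (what is proved, stated in full; the proofs are below) =====
def Claim_equal_segment_contacts_by_persona : Prop := ∀ (contacts : List (List (String × String))), Dom_segment_contacts_by_persona contacts → Spec_segment_contacts_by_persona contacts (segment_contacts_by_persona contacts)

-- ===== LEMMAS AND PROOFS =====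

-- one step of A's loop on the three-bucket dict
theorem pvStepA_mk (c : List (String × String)) (b1 b2 b3 : List (List (String × String))) :
    pvStepA (PySem.Dict.mk [("founders", b1), ("creatives", b2), ("operations", b3)]) c
    = PySem.Dict.mk [("founders", b1 ++ if pvPersonaOf c == "founders" then [c] else []),
                     ("creatives", b2 ++ if pvPersonaOf c == "creatives" then [c] else []),
                     ("operations", b3 ++ if pvPersonaOf c == "operations" then [c] else [])] := by
  by_cases h1 : pvPersonaOf c = "founders"
  · simp [pvStepA, h1, PySem.Dict.contains, PySem.Dict.modify, PySem.Dict.insert,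
          PySem.Dict.getD, PySem.Dict.get?]
  · by_cases h2 : pvPersonaOf c = "creatives"
    · simp [pvStepA, h2, PySem.Dict.contains, PySem.Dict.modify, PySem.Dict.insert,
            PySem.Dict.getD, PySem.Dict.get?]
    · by_cases h3 : pvPersonaOf c = "operations"
      · simp [pvStepA, h3, PySem.Dict.contains, PySem.Dict.modify, PySem.Dict.insert,
              PySem.Dict.getD, PySem.Dict.get?]
      · simp [pvStepA, PySem.Dict.contains, h1, h2, h3, Ne.symm h1, Ne.symm h2, Ne.symm h3]

-- invariant of A's fold: starting from the three-bucket dict, it appends the matching contacts to each bucket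
theorem segment_fold_items (l : List (List (String × String)))
    (b1 b2 b3 : List (List (String × String))) :
    (l.foldl pvStepA (PySem.Dict.mk [("founders", b1), ("creatives", b2), ("operations", b3)])).items
    = [("founders", b1 ++ l.filter (fun c => pvPersonaOf c == "founders")),
       ("creatives", b2 ++ l.filter (fun c => pvPersonaOf c == "creatives")),
       ("operations", b3 ++ l.filter (fun c => pvPersonaOf c == "operations"))] := by
  induction l generalizing b1 b2 b3 with
  | nil => simp
  | cons c rest ih =>
    rw [List.foldl_cons, pvStepA_mk, ih]
    simp only [List.filter_cons, List.append_assoc]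
    by_cases h1 : pvPersonaOf c = "founders" <;>
      by_cases h2 : pvPersonaOf c = "creatives" <;>
        by_cases h3 : pvPersonaOf c = "operations" <;>
          simp_all

-- ===== VERDICT (by name: the statement is the Claim_ definition above) =====
theorem segment_contacts_by_persona_spec : Claim_equal_segment_contacts_by_persona := by
  intro contacts _
  unfold Spec_segment_contacts_by_persona segment_contacts_by_persona segment_contacts_by_persona_alt
  simp [segment_fold_items]
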